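-- pv_equiv track=rewrite | github.com/xubocheng/MetaEvo | rand_gen.py | has_consecutive_or_interspersed
-- ===== SOURCE A (Python) =====
-- def has_consecutive_or_interspersed(sequence, group1, group2, limit):
--     count = 0
--     for elem in sequence.split(')'):
--         elem += ')'
--         if elem in [group1, group2]:
--             count += 1
--             if count >= limit:
--                 return True
--         else:
--             count = 0
--     return False
-- ===== SOURCE B (Python) =====
-- def has_consecutive_or_interspersed(sequence, group1, group2, limit):
--     # Prefix-sum sliding window: a run of matching tokens of length L exists
--     # iff some window of L tokens contains exactly L matches.
--     L = max(limit, 1)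
--     pref = [0]
--     for e in sequence.split(')'):
--         pref.append(pref[-1] + ((e + ')') in (group1, group2)))
--     return any(b - a == L for a, b in zip(pref, pref[L:]))
-- ===== Notes on version B (the rewrite author's own statement) =====
-- stated objective: alternative
-- what changed: Replaces A's streaming counter-with-reset scan by a staged prefix-sum pass: B builds the list of running match counts once, then tests whether any window of max(limit,1) tokens contains exactly that many matches via zip of the prefix list with its shifted self.
import Mathlib
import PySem

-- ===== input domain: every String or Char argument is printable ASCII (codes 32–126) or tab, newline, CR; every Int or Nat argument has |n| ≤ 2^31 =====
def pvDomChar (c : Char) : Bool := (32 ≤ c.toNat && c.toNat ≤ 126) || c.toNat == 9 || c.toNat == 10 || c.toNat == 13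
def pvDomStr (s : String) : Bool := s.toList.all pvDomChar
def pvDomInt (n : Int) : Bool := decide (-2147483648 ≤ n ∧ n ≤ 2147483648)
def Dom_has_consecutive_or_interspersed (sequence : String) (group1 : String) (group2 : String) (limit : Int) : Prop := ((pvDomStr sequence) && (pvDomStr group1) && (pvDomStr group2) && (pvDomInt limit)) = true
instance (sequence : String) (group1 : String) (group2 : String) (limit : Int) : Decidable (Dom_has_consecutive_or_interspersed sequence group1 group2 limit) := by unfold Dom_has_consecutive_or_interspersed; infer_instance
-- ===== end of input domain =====

-- B replaces A's counter-with-reset scan by a staged prefix-sum pass plus a zip-window test (objective: alternative).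

-- ===== PORT A =====
-- the for-loop of A: state = count (Python int); early return True becomes the `true` branch
def hciGoA (group1 group2 : List Char) (limit : Int) : List (List Char) → Int → Bool
  | [], _ => false
  | e :: rest, count =>
    let elem := e ++ [')']
    if elem == group1 || elem == group2 then
      if limit ≤ count + 1 then true
      else hciGoA group1 group2 limit rest (count + 1)
    else hciGoA group1 group2 limit rest 0

def has_consecutive_or_interspersed (sequence : String) (group1 : String) (group2 : String) (limit : Int) : Bool :=
  hciGoA group1.toList group2.toList limit (PySem.Chars.splitOn sequence.toList [')']) 0

-- ===== PORT B =====
-- Source B's pref-building loop: each step appends pref[-1] + (test); `last` carries pref[-1]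
def hciPrefA (group1 group2 : List Char) : Int → List (List Char) → List Int
  | _, [] => []
  | last, e :: es =>
    let v := last + (if e ++ [')'] == group1 || e ++ [')'] == group2 then 1 else 0)
    v :: hciPrefA group1 group2 v es

def has_consecutive_or_interspersed_alt (sequence : String) (group1 : String) (group2 : String) (limit : Int) : Bool :=
  let L : Int := max limit 1
  let pref : List Int := 0 :: hciPrefA group1.toList group2.toList 0 (PySem.Chars.splitOn sequence.toList [')'])
  ((pref.zip (PySem.List.slice pref (some L) none)).any (fun p => p.2 - p.1 == L))

-- ===== PRECONDITION & SPEC =====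
def Spec_has_consecutive_or_interspersed (sequence : String) (group1 : String) (group2 : String) (limit : Int) (out : Bool) : Prop := out = has_consecutive_or_interspersed_alt sequence group1 group2 limit
instance (sequence : String) (group1 : String) (group2 : String) (limit : Int) (out : Bool) : Decidable (Spec_has_consecutive_or_interspersed sequence group1 group2 limit out) := by unfold Spec_has_consecutive_or_interspersed; infer_instance

-- ===== CLAIM (what is proved, stated in full; the proofs are below) =====
def Claim_equal_has_consecutive_or_interspersed : Prop := ∀ (sequence : String) (group1 : String) (group2 : String) (limit : Int), Dom_has_consecutive_or_interspersed sequence group1 group2 limit → Spec_has_consecutive_or_interspersed sequence group1 group2 limit (has_consecutive_or_interspersed sequence group1 group2 limit)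

-- ===== LEMMAS AND PROOFS =====

-- token-membership flag
def hciFlag (group1 group2 : List Char) (e : List Char) : Bool :=
  e ++ [')'] == group1 || e ++ [')'] == group2

-- flag-level version of A's loop
def hciLoopF (limit : Int) : List Bool → Int → Bool
  | [], _ => false
  | f :: fs, count =>
    if f then
      if limit ≤ count + 1 then true else hciLoopF limit fs (count + 1)
    else hciLoopF limit fs 0

-- flag-level prefix-count list (B's pref tail)
def hciPrefF : Int → List Bool → List Int
  | _, [] => []
  | c, f :: fs =>
    (c + (if f then 1 else 0)) :: hciPrefF (c + (if f then 1 else 0)) fs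

def hciP (fs : List Bool) : List Int := 0 :: hciPrefF 0 fs

-- flag-level version of B's zip-window test
def hciZ (L : Nat) (fs : List Bool) : Bool :=
  ((hciP fs).zip ((hciP fs).drop L)).any (fun p => p.2 - p.1 == (L : Int))

-- common target: "some window of L consecutive matches exists", in leading-run form
def hciW (L : Nat) : List Bool → Bool
  | [] => false
  | f :: fs => decide (L ≤ ((f :: fs).takeWhile (fun b => b)).length) || hciW L fs

theorem hciGoA_eq_loopF (g1 g2 : List Char) (limit : Int) :
    ∀ (ts : List (List Char)) (c : Int),
      hciGoA g1 g2 limit ts c = hciLoopF limit (ts.map (hciFlag g1 g2)) c := by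
  intro ts
  induction ts with
  | nil => intro c; rfl
  | cons e rest ih =>
    intro c
    simp only [hciGoA, hciLoopF, List.map_cons, hciFlag]
    by_cases h : (e ++ [')'] == g1 || e ++ [')'] == g2) = true
    · simp [h, ih]
    · simp [h, ih]

theorem hciPrefA_eq_prefF (g1 g2 : List Char) :
    ∀ (ts : List (List Char)) (c : Int),
      hciPrefA g1 g2 c ts = hciPrefF c (ts.map (hciFlag g1 g2)) := by
  intro ts
  induction ts with
  | nil => intro c; rfl
  | cons e rest ih =>
    intro c
    simp only [hciPrefA, hciPrefF, List.map_cons, hciFlag, ih]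

theorem hciPrefF_length : ∀ (fs : List Bool) (c : Int), (hciPrefF c fs).length = fs.length := by
  intro fs
  induction fs with
  | nil => intro c; rfl
  | cons f fs ih => intro c; simp [hciPrefF, ih]

theorem hciPrefF_shift : ∀ (fs : List Bool) (c : Int),
    hciPrefF c fs = (hciPrefF 0 fs).map (fun x => c + x) := by
  intro fs
  induction fs with
  | nil => intro c; rfl
  | cons f fs ih =>
    intro c
    simp only [hciPrefF, List.map_cons, zero_add]
    congr 1
    rw [ih (c + (if f then 1 else 0)), ih (if f then 1 else 0), List.map_map]
    congr 1
    funext x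
    simp [add_assoc]

theorem hciP_cons (f : Bool) (fs : List Bool) :
    hciP (f :: fs) = 0 :: (hciP fs).map (fun x => (if f then 1 else 0) + x) := by
  simp only [hciP, hciPrefF, zero_add, List.map_cons, add_zero]
  rw [hciPrefF_shift fs (if f then 1 else 0)]

theorem hciP_get : ∀ (fs : List Bool) (i : Nat), i ≤ fs.length →
    (hciP fs)[i]? = some (((fs.take i).count true : Nat) : Int) := by
  intro fs
  induction fs with
  | nil =>
    intro i hi
    have : i = 0 := by simpa using hi
    subst this
    rfl
  | cons f fs ih =>
    intro i hi
    cases i with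
    | zero => rfl
    | succ j =>
      rw [hciP_cons]
      simp only [List.getElem?_cons_succ, List.getElem?_map]
      rw [ih j (by simpa using hi)]
      simp only [Option.map_some]
      congr 1
      rw [List.take_succ_cons, List.count_cons]
      cases f <;> simp <;> push_cast <;> ring

-- leading-run length vs window count: L ≤ lead(fs) ↔ (L ≤ |fs| ∧ count(take L fs) = L)
theorem hciLead_iff : ∀ (fs : List Bool) (L : Nat),
    (L ≤ (fs.takeWhile (fun b => b)).length) ↔ (L ≤ fs.length ∧ (fs.take L).count true = L) := by
  intro fs
  induction fs with
  | nil =>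
    intro L
    simp only [List.takeWhile_nil, List.length_nil, List.take_nil, List.count_nil]
    omega
  | cons f fs ih =>
    intro L
    cases L with
    | zero => simp
    | succ k =>
      cases f with
      | true =>
        rw [List.takeWhile_cons]
        simp only [decide_true, if_true, List.length_cons, Nat.succ_le_succ_iff,
          List.take_succ_cons, List.count_cons]
        rw [ih k]
        simp
      | false =>
        have ht : ((false :: fs).takeWhile (fun b => b)) = [] := by simp
        rw [ht]
        simp only [List.length_nil, List.length_cons, List.take_succ_cons, List.count_cons]
        constructor
        · omega
        · rintro ⟨_, hc⟩
          have h1 := List.count_le_length (l := fs.take k) (a := true)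
          have h2 := List.length_take_le k fs
          simp at hc
          omega

theorem hciLead_le : ∀ (fs : List Bool), (fs.takeWhile (fun b => b)).length ≤ fs.length := by
  intro fs
  induction fs with
  | nil => simp
  | cons f fs ih =>
    rw [List.takeWhile_cons]
    cases f <;> simp <;> omega

theorem hciW_big : ∀ (fs : List Bool) (L : Nat), fs.length < L → hciW L fs = false := by
  intro fs
  induction fs with
  | nil => intro L _; rfl
  | cons f fs ih =>
    intro L h
    rw [hciW]
    have h1 : ¬ (L ≤ ((f :: fs).takeWhile (fun b => b)).length) := by
      have := hciLead_le (f :: fs)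
      simp only [List.length_cons] at *
      omega
    rw [ih L (by simp at h ⊢; omega)]
    simp [h1]

-- limit ≤ lead fs → the window exists
theorem hciW_of_lead (limit : Int) (hl : 1 ≤ limit) (fs : List Bool)
    (h : limit ≤ ((fs.takeWhile (fun b => b)).length : Int)) :
    hciW limit.toNat fs = true := by
  cases fs with
  | nil =>
    simp only [List.takeWhile_nil, List.length_nil, Nat.cast_zero] at h
    omega
  | cons f fs =>
    rw [hciW]
    have : limit.toNat ≤ ((f :: fs).takeWhile (fun b => b)).length := by omega
    simp [this]

-- main invariant for A's loop, limit ≥ 1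
theorem hciLoopF_char (limit : Int) (hl : 1 ≤ limit) :
    ∀ (fs : List Bool) (c : Int), 0 ≤ c → c < limit →
      hciLoopF limit fs c =
        (decide (limit ≤ c + ((fs.takeWhile (fun b => b)).length : Int)) || hciW limit.toNat fs) := by
  intro fs
  induction fs with
  | nil =>
    intro c hc hcl
    have h0 : decide (limit ≤ c + (((List.takeWhile (fun b => b) ([] : List Bool)).length : Nat) : Int)) = false := by
      rw [decide_eq_false_iff_not]
      simp only [List.takeWhile_nil, List.length_nil, Nat.cast_zero]
      omega
    rw [show hciLoopF limit [] c = false from rfl, show hciW limit.toNat [] = false from rfl,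
      h0, Bool.false_or]
  | cons f fs ih =>
    intro c hc hcl
    cases f with
    | true =>
      have hlead : ((true :: fs).takeWhile (fun b => b)) = true :: fs.takeWhile (fun b => b) := by
        rw [List.takeWhile_cons]; rfl
      rw [show hciLoopF limit (true :: fs) c =
          (if limit ≤ c + 1 then true else hciLoopF limit fs (c + 1)) from rfl,
        hciW, hlead, List.length_cons]
      by_cases hle : limit ≤ c + 1
      · have h1 : decide (limit ≤ c + (((fs.takeWhile (fun b => b)).length + 1 : Nat) : Int)) = true := by
          rw [decide_eq_true_iff]; push_cast; omega
        rw [if_pos hle, h1, Bool.true_or]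
      · rw [if_neg hle, ih (c + 1) (by omega) (by omega)]
        by_cases hh : limit.toNat ≤ (fs.takeWhile (fun b => b)).length + 1
        · have h1 : decide (limit ≤ c + (((fs.takeWhile (fun b => b)).length + 1 : Nat) : Int)) = true := by
            rw [decide_eq_true_iff]; push_cast; omega
          have h2 : decide (limit ≤ c + 1 + (((fs.takeWhile (fun b => b)).length : Nat) : Int)) = true := by
            rw [decide_eq_true_iff]; push_cast; omega
          have h3 : decide (limit.toNat ≤ (fs.takeWhile (fun b => b)).length + 1) = true := by
            rw [decide_eq_true_iff]; omega
          rw [h1, h2, h3]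
          rfl
        · have h1 : decide (limit ≤ c + (((fs.takeWhile (fun b => b)).length + 1 : Nat) : Int)) =
              decide (limit ≤ c + 1 + (((fs.takeWhile (fun b => b)).length : Nat) : Int)) := by
            rw [decide_eq_decide]; push_cast; omega
          have h3 : decide (limit.toNat ≤ (fs.takeWhile (fun b => b)).length + 1) = false := by
            rw [decide_eq_false_iff_not]; omega
          rw [h1, h3, Bool.false_or]
    | false =>
      have hlead : ((false :: fs).takeWhile (fun b => b)) = [] := by simp
      rw [show hciLoopF limit (false :: fs) c = hciLoopF limit fs 0 from rfl,
        hciW, hlead, ih 0 (by omega) (by omega)]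
      have hc0 : decide (limit ≤ c + ((([] : List Bool).length : Nat) : Int)) = false := by
        rw [decide_eq_false_iff_not]; simp only [List.length_nil, Nat.cast_zero]; omega
      have hw0 : decide (limit.toNat ≤ (([] : List Bool).length)) = false := by
        rw [decide_eq_false_iff_not]; simp; omega
      rw [hc0, hw0, Bool.false_or, Bool.false_or]
      by_cases h : limit ≤ 0 + ((fs.takeWhile (fun b => b)).length : Int)
      · have hw := hciW_of_lead limit hl fs (by omega)
        have hd : decide (limit ≤ 0 + (((fs.takeWhile (fun b => b)).length : Nat) : Int)) = true := by
          rw [decide_eq_true_iff]; omega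
        rw [hd, hw, Bool.true_or]
      · have hd : decide (limit ≤ 0 + (((fs.takeWhile (fun b => b)).length : Nat) : Int)) = false := by
          rw [decide_eq_false_iff_not]; omega
        rw [hd, Bool.false_or]

-- limit ≤ 0: A's loop returns "any flag is set"
theorem hciLoopF_nonpos (limit : Int) (hl : limit ≤ 0) :
    ∀ (fs : List Bool) (c : Int), 0 ≤ c → hciLoopF limit fs c = fs.any (fun b => b) := by
  intro fs
  induction fs with
  | nil => intro c _; rfl
  | cons f fs ih =>
    intro c hc
    cases f with
    | true =>
      have : limit ≤ c + 1 := by omega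
      simp [hciLoopF, this]
    | false =>
      have hstep : hciLoopF limit (false :: fs) c = hciLoopF limit fs 0 := rfl
      rw [hstep, ih 0 (by omega)]
      simp

theorem hciW_one : ∀ (fs : List Bool), hciW 1 fs = fs.any (fun b => b) := by
  intro fs
  induction fs with
  | nil => rfl
  | cons f fs ih =>
    rw [hciW, ih, List.any_cons]
    cases f with
    | true =>
      have : (1 ≤ ((true :: fs).takeWhile (fun b => b)).length) := by
        rw [List.takeWhile_cons]; simp
      simp [this]
    | false =>
      have : ((false :: fs).takeWhile (fun b => b)) = [] := by rw [List.takeWhile_cons]; rfl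
      simp [this]

-- A's loop equals the window spec
theorem hciLoopF_eq_W (limit : Int) (fs : List Bool) :
    hciLoopF limit fs 0 = hciW (max limit 1).toNat fs := by
  by_cases hl : 1 ≤ limit
  · have hmax : max limit 1 = limit := by omega
    rw [hmax, hciLoopF_char limit hl fs 0 (by omega) (by omega)]
    by_cases h : limit ≤ 0 + ((fs.takeWhile (fun b => b)).length : Int)
    · have hw := hciW_of_lead limit hl fs (by omega)
      have hd : decide (limit ≤ 0 + (((fs.takeWhile (fun b => b)).length : Nat) : Int)) = true := by
        rw [decide_eq_true_iff]; omega
      rw [hd, hw, Bool.true_or]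
    · have hd : decide (limit ≤ 0 + (((fs.takeWhile (fun b => b)).length : Nat) : Int)) = false := by
        rw [decide_eq_false_iff_not]; omega
      rw [hd, Bool.false_or]
  · have hmax : max limit 1 = 1 := by omega
    rw [hmax, hciLoopF_nonpos limit (by omega) fs 0 (by omega)]
    simp [hciW_one]

-- shift invariance of the zip-window test
theorem hciZ_shift (L : Nat) (v : Int) (xs ys : List Int) :
    ((xs.map (fun x => v + x)).zip (ys.map (fun x => v + x))).any (fun p => p.2 - p.1 == (L : Int)) =
      (xs.zip ys).any (fun p => p.2 - p.1 == (L : Int)) := by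
  rw [List.zip_map]
  rw [List.any_map]
  congr 1
  funext p
  simp only [Function.comp, Prod.map]
  congr 1
  omega

-- B's zip-window test equals the window spec
theorem hciZ_eq_W (L : Nat) (hL : 1 ≤ L) : ∀ (fs : List Bool), hciZ L fs = hciW L fs := by
  obtain ⟨k, rfl⟩ : ∃ k, L = k + 1 := ⟨L - 1, by omega⟩
  intro fs
  induction fs with
  | nil =>
    simp [hciZ, hciP, hciPrefF, hciW, List.drop_succ_cons]
  | cons f fs ih =>
    rw [hciZ, hciP_cons, List.drop_succ_cons, ← List.map_drop]
    cases hdrop : (hciP fs).drop k with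
    | nil =>
      have hlen : (hciP fs).length ≤ k := List.drop_eq_nil_iff.mp hdrop
      have hplen : (hciP fs).length = fs.length + 1 := by simp [hciP, hciPrefF_length]
      rw [hciW_big (f :: fs) (k + 1) (by simp; omega)]
      simp
    | cons q qs =>
      have hklen : k < (hciP fs).length := by
        by_contra hcon
        rw [List.drop_eq_nil_iff.mpr (by omega)] at hdrop
        simp at hdrop
      have hplen : (hciP fs).length = fs.length + 1 := by simp [hciP, hciPrefF_length]
      have hq : q = (((fs.take k).count true : Nat) : Int) := by
        have h1 : (hciP fs)[k]? = some q := by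
          rw [← List.head?_drop, hdrop]; rfl
        rw [hciP_get fs k (by omega)] at h1
        exact (Option.some.inj h1).symm
      have hqs : qs = (hciP fs).drop (k + 1) := by
        have h2 : (hciP fs).drop (k + 1) = ((hciP fs).drop k).tail := by
          rw [← List.drop_drop]; simp
        rw [h2, hdrop]; rfl
      simp only [List.map_cons, List.zip_cons_cons, List.any_cons]
      have htail : (((hciP fs).map (fun x => (if f then 1 else 0) + x)).zip
          (qs.map (fun x => (if f then 1 else 0) + x))).any
          (fun p => p.2 - p.1 == ((k + 1 : Nat) : Int)) = hciW (k + 1) fs := by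
        rw [hciZ_shift, hqs, ← hciZ, ih]
      rw [htail, hciW]
      congr 1
      -- head disjunct: v + count(take k fs) = L  ↔  L ≤ lead(f :: fs)
      have hcount : (if f then (1:Int) else 0) + (((fs.take k).count true : Nat) : Int) =
          ((((f :: fs).take (k + 1)).count true : Nat) : Int) := by
        rw [List.take_succ_cons, List.count_cons]
        cases f <;> simp <;> push_cast <;> ring
      rw [hq]
      have hlen2 : k + 1 ≤ (f :: fs).length := by simp; omega
      have heq : ∀ a b : Int, (a - 0 == b) = decide (a = b) := by
        intro a b
        rw [sub_zero, beq_eq_decide]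
      rw [heq, hcount, decide_eq_decide, hciLead_iff (f :: fs) (k + 1)]
      constructor
      · intro h
        exact ⟨hlen2, by exact_mod_cast h⟩
      · rintro ⟨_, h⟩
        exact_mod_cast h

-- ===== VERDICT (by name: the statement is the Claim_ definition above) =====
theorem has_consecutive_or_interspersed_spec : Claim_equal_has_consecutive_or_interspersed := by
  intro sequence group1 group2 limit _
  unfold Spec_has_consecutive_or_interspersed
  have hL1 : (1:Int) ≤ max limit 1 := le_max_right _ _
  have hLt : (((max limit 1).toNat : Nat) : Int) = max limit 1 := by omega
  have halt : has_consecutive_or_interspersed_alt sequence group1 group2 limit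
      = hciZ (max limit 1).toNat ((PySem.Chars.splitOn sequence.toList [')']).map
          (hciFlag group1.toList group2.toList)) := by
    show ((0 :: hciPrefA group1.toList group2.toList 0 (PySem.Chars.splitOn sequence.toList [')'])).zip
        (PySem.List.slice (0 :: hciPrefA group1.toList group2.toList 0 (PySem.Chars.splitOn sequence.toList [')']))
          (some (max limit 1)) none)).any (fun p => p.2 - p.1 == max limit 1) = _
    rw [hciPrefA_eq_prefF, PySem.List.slice_from]
    · rw [hciZ, hciP, hLt]
    · omega
  have ha : has_consecutive_or_interspersed sequence group1 group2 limit
      = hciLoopF limit ((PySem.Chars.splitOn sequence.toList [')']).map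
          (hciFlag group1.toList group2.toList)) 0 :=
    hciGoA_eq_loopF group1.toList group2.toList limit (PySem.Chars.splitOn sequence.toList [')']) 0
  rw [ha, halt, hciLoopF_eq_W, hciZ_eq_W (max limit 1).toNat (by omega)]
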